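-- pv_equiv track=rewrite | github.com/romeorizzi/TAlight | example_problems/tutorial/increasing_subseq/services/increasing_subsequence_lib.py | get_max_inc_seq
-- ===== SOURCE A (Python) =====
-- def get_max_inc_seq(T,col):
--     max_col = max(col)
--     T_tmp = T[:]
--     ret = []
--     for i in range(len(T)-1, -1, -1):
--         if col[i] == max_col:
--             ret.append(T[i])
--             max_col = max_col-1
--
--     ret.reverse()
--     return ret
-- ===== SOURCE B (Python) =====
-- def get_max_inc_seq(T, col):
--     max_col = max(col)
--     # index table: value -> ascending list of its positions among the first len(T) entries
--     pos = {}
--     for i in range(len(T)):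
--         c = col[i]
--         pos[c] = pos.get(c, []) + [i]
--     res = []
--     bound = len(T)
--     target = max_col
--     while True:
--         found = None
--         for j in reversed(pos.get(target, [])):
--             if j < bound:
--                 found = j
--                 break
--         if found is None:
--             break
--         res.append(T[found])
--         bound = found
--         target -= 1
--     res.reverse()
--     return res
-- ===== Notes on version B (the rewrite author's own statement) =====
-- stated objective: alternative
-- what changed: Instead of A's single right-to-left scan that decrements the target on each match, B builds a value->positions index table in one forward pass and then walks target values downward from max(col), each time picking the largest recorded position below a shrinking bound.
import Mathlib
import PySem

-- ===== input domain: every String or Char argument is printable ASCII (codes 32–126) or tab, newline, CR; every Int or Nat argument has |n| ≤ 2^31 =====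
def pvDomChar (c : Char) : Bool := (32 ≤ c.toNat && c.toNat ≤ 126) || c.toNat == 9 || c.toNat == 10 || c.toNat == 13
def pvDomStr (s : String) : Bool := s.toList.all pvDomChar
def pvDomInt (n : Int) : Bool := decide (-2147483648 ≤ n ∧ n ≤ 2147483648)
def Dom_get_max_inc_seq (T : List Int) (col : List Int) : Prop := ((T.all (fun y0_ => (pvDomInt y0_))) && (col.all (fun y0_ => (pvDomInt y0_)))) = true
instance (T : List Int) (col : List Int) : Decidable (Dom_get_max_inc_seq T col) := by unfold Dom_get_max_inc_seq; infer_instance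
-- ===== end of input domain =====

-- B replaces A's single right-to-left scan with an index table (value -> ascending positions)
-- consulted per target value under a decreasing bound; objective: alternative decomposition, not faster.

-- ===== PORT A =====
-- xs[i] at a Nat index, as Python reads it (in range inside Pre_; getD 0 is never reached there)
def pvAt (xs : List Int) (i : Nat) : Int := (PySem.List.pyGet? xs (i : Int)).getD 0

-- the for-loop over range(len(T)-1, -1, -1) with state (max_col, ret)
def pvALoop (T col : List Int) : Nat → Int → List Int → (Int × List Int)
  | 0, m, ret => (m, ret)
  | i+1, m, ret =>
    if pvAt col i = m then pvALoop T col i (m - 1) (ret ++ [pvAt T i])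
    else pvALoop T col i m ret

def get_max_inc_seq (T : List Int) (col : List Int) : List Int :=
  let max_col : Int := (PySem.List.max? col (fun x => x)).getD 0
  ((pvALoop T col T.length max_col []).2).reverse

-- ===== PORT B =====
-- pos: value -> ascending list of its positions among the first len(T) entries
def pvPos (T col : List Int) : PySem.Dict Int (List Int) :=
  ((List.range T.length).map (fun i => (pvAt col i, (i : Int)))).foldl
    (fun d p => d.modify p.1 [] (fun l => l ++ [p.2])) PySem.Dict.empty

-- the while loop: largest recorded position of `target` below `bound`, collect, tighten bound
def pvBLoop (T col : List Int) (pos : PySem.Dict Int (List Int)) : Nat → Int → Int → List Int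
  | 0, _, _ => []
  | f+1, b, m =>
    match ((pos.getD m []).reverse).find? (fun j => decide (j < b)) with
    | none => []
    | some i => (PySem.List.pyGet? T i).getD 0 :: pvBLoop T col pos f i (m - 1)

def get_max_inc_seq_alt (T : List Int) (col : List Int) : List Int :=
  let max_col : Int := (PySem.List.max? col (fun x => x)).getD 0
  (pvBLoop T col (pvPos T col) (T.length + 1) (T.length : Int) max_col).reverse

-- ===== PRECONDITION & SPEC =====
-- Pre_ excludes exactly the inputs where Python A raises: empty col (ValueError from max)
-- and col shorter than T (IndexError at col[i]).
def Pre_get_max_inc_seq (T : List Int) (col : List Int) : Prop :=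
  col ≠ [] ∧ T.length ≤ col.length
instance (T : List Int) (col : List Int) : Decidable (Pre_get_max_inc_seq T col) := by
  unfold Pre_get_max_inc_seq; infer_instance

def pvWitness_get_max_inc_seq : List Int × List Int := ([3, 1, 4], [1, 1, 2])

def Spec_get_max_inc_seq (T : List Int) (col : List Int) (out : List Int) : Prop := out = get_max_inc_seq_alt T col
instance (T : List Int) (col : List Int) (out : List Int) : Decidable (Spec_get_max_inc_seq T col out) := by unfold Spec_get_max_inc_seq; infer_instance

-- ===== CLAIM (what is proved, stated in full; the proofs are below) =====
def Claim_equal_get_max_inc_seq : Prop := ∀ (T : List Int) (col : List Int), Dom_get_max_inc_seq T col → Pre_get_max_inc_seq T col → Spec_get_max_inc_seq T col (get_max_inc_seq T col)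

-- ===== LEMMAS AND PROOFS =====

-- pure form of A's scan: elements collected from index b-1 down to 0, in that (descending) order
def pvGA (T col : List Int) : Nat → Int → List Int
  | 0, _ => []
  | i+1, m => if pvAt col i = m then pvAt T i :: pvGA T col i (m - 1) else pvGA T col i m

theorem pvALoop_eq (T col : List Int) : ∀ (b : Nat) (m : Int) (ret : List Int),
    (pvALoop T col b m ret).2 = ret ++ pvGA T col b m := by
  intro b
  induction b with
  | zero => intro m ret; simp [pvALoop, pvGA]
  | succ i ih =>
    intro m ret
    by_cases h : pvAt col i = m
    · simp [pvALoop, pvGA, h, ih]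
    · simp [pvALoop, pvGA, h, ih]

theorem pvPos_getD (T col : List Int) (m : Int) :
    (pvPos T col).getD m [] =
      ((List.range T.length).filter (fun i => pvAt col i == m)).map (Nat.cast : Nat → Int) := by
  unfold pvPos
  rw [PySem.Dict.getD_foldl_modify_append]
  simp only [PySem.Dict.getD_empty, List.nil_append, List.filter_map, List.map_map,
    Function.comp_def]

theorem pv_find?_all {α : Type} (p : α → Bool) (l : List α) (h : ∀ x ∈ l, p x = true) :
    l.find? p = l.head? := by
  cases l with
  | nil => rfl
  | cons a t => simp [List.find?, h a (List.mem_cons_self)]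

theorem pvFind_lemma (P : Nat → Bool) (n b : Nat) (hb : b ≤ n) :
    (((List.range n).filter P).map (Nat.cast : Nat → Int)).reverse.find?
        (fun j => decide (j < (b : Int))) =
      (((List.range b).filter P).reverse.head?).map (Nat.cast : Nat → Int) := by
  obtain ⟨k, rfl⟩ : ∃ k, n = b + k := ⟨n - b, by omega⟩
  rw [List.range_add, List.filter_append, List.map_append, List.reverse_append,
    List.find?_append]
  have h1 : ((((List.range k).map (fun x => b + x)).filter P).map (Nat.cast : Nat → Int)).reverse.find?
      (fun j => decide (j < (b : Int))) = none := by
    rw [List.find?_eq_none]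
    intro x hx
    rw [List.mem_reverse, List.mem_map] at hx
    obtain ⟨y, hy, rfl⟩ := hx
    have := List.mem_filter.mp hy
    obtain ⟨z, hz, rfl⟩ := List.mem_map.mp this.1
    simp
  rw [h1]
  have h2 : ∀ x ∈ (((List.range b).filter P).map (Nat.cast : Nat → Int)).reverse,
      (fun j => decide (j < (b : Int))) x = true := by
    intro x hx
    rw [List.mem_reverse, List.mem_map] at hx
    obtain ⟨y, hy, rfl⟩ := hx
    have := (List.mem_filter.mp hy).1
    rw [List.mem_range] at this
    simp
    exact_mod_cast this
  rw [Option.none_or, pv_find?_all _ _ h2, ← List.map_reverse, List.head?_map]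

theorem pvGA_nil (T col : List Int) (b : Nat) (m : Int)
    (h : ∀ i < b, pvAt col i ≠ m) : pvGA T col b m = [] := by
  induction b with
  | zero => simp [pvGA]
  | succ k ih =>
    have hk := h k (Nat.lt_succ_self k)
    simp [pvGA, hk]
    exact ih (fun i hi => h i (Nat.lt_succ_of_lt hi))

theorem pvGA_step (T col : List Int) (m : Int) (i : Nat) : ∀ (b : Nat),
    i < b → pvAt col i = m → (∀ j, i < j → j < b → pvAt col j ≠ m) →
    pvGA T col b m = pvAt T i :: pvGA T col i (m - 1) := by
  intro b
  induction b with
  | zero => intro h; omega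
  | succ k ih =>
    intro hib hc hmax
    rcases Nat.lt_succ_iff_lt_or_eq.mp hib with hik | hik
    · have hk : pvAt col k ≠ m := hmax k hik (Nat.lt_succ_self k)
      simp [pvGA, hk]
      exact ih hik hc (fun j h1 h2 => hmax j h1 (Nat.lt_succ_of_lt h2))
    · subst hik
      simp [pvGA, hc]

-- the last element of an ascending list bounds every element
theorem pv_last_max (l : List Nat) (h : l.Pairwise (· < ·)) (i0 : Nat)
    (h2 : l.reverse.head? = some i0) : i0 ∈ l ∧ ∀ x ∈ l, x ≤ i0 := by
  have hrevp : l.reverse.Pairwise (fun a b => b < a) := by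
    rw [List.pairwise_reverse]; exact h
  cases hrev : l.reverse with
  | nil => rw [hrev] at h2; simp at h2
  | cons a t =>
    rw [hrev] at h2 hrevp
    obtain rfl : a = i0 := by simpa using h2
    rw [List.pairwise_cons] at hrevp
    constructor
    · have hm : a ∈ l.reverse := by rw [hrev]; exact List.mem_cons_self
      rwa [List.mem_reverse] at hm
    · intro x hx
      have hx' : x ∈ l.reverse := List.mem_reverse.mpr hx
      rw [hrev, List.mem_cons] at hx'
      rcases hx' with rfl | hxt
      · exact le_refl _
      · exact le_of_lt (hrevp.1 x hxt)

theorem pvMain (T col : List Int) : ∀ (f b : Nat) (m : Int), b ≤ f → b ≤ T.length →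
    pvBLoop T col (pvPos T col) f (b : Int) m = pvGA T col b m := by
  intro f
  induction f with
  | zero =>
    intro b m hbf _
    interval_cases b
    simp [pvBLoop, pvGA]
  | succ f ih =>
    intro b m hbf hbn
    have hfind := pvFind_lemma (fun i => pvAt col i == m) T.length b hbn
    simp only [pvBLoop, pvPos_getD]
    rw [hfind]
    cases hhead : ((List.range b).filter (fun i => pvAt col i == m)).reverse.head? with
    | none =>
      simp only [Option.map_none]
      have hnil : ((List.range b).filter (fun i => pvAt col i == m)) = [] := by
        rw [← List.reverse_eq_nil_iff, ← List.head?_eq_none_iff, hhead]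
      rw [pvGA_nil]
      intro i hi hc
      have : i ∈ (List.range b).filter (fun i => pvAt col i == m) := by
        rw [List.mem_filter, List.mem_range]
        exact ⟨hi, by simp [hc]⟩
      rw [hnil] at this
      simp at this
    | some i0 =>
      have hpw : ((List.range b).filter (fun i => pvAt col i == m)).Pairwise (· < ·) :=
        (List.pairwise_lt_range).filter _
      obtain ⟨hmem, hmax⟩ := pv_last_max _ hpw i0 hhead
      rw [List.mem_filter, List.mem_range] at hmem
      obtain ⟨hi0b, hi0c⟩ := hmem
      have hi0c' : pvAt col i0 = m := by simpa using hi0c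
      simp only [Option.map_some]
      rw [pvGA_step T col m i0 b hi0b hi0c' ?side]
      case side =>
        intro j hj1 hj2 hc
        have hjmem : j ∈ (List.range b).filter (fun i => pvAt col i == m) := by
          rw [List.mem_filter, List.mem_range]
          exact ⟨hj2, by simp [hc]⟩
        have := hmax j hjmem
        omega
      rw [ih i0 (m - 1) (by omega) (by omega)]
      rfl

theorem pv_ports_eq (T col : List Int) : get_max_inc_seq T col = get_max_inc_seq_alt T col := by
  show (pvALoop T col T.length ((PySem.List.max? col (fun x => x)).getD 0) []).2.reverse
      = (pvBLoop T col (pvPos T col) (T.length + 1) (T.length : Int)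
          ((PySem.List.max? col (fun x => x)).getD 0)).reverse
  rw [pvALoop_eq, pvMain T col (T.length + 1) T.length _ (Nat.le_succ _) (le_refl _)]
  simp

-- ===== VERDICT (by name: the statement is the Claim_ definition above) =====
theorem get_max_inc_seq_spec : Claim_equal_get_max_inc_seq := by
  intro T col _ _
  unfold Spec_get_max_inc_seq
  exact pv_ports_eq T col
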